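-- pv_equiv track=rewrite | github.com/teichbauer/solver19 | pathfinder.py | verify_pth
-- ===== SOURCE A (Python) =====
-- def verify_pth(lst, pth): # pth: (7,1,4)
--     nvs = (60, 57, 54)
--     cand60 = []
--     for b in lst:
--         if pth[0] in b[60]:
--             cand60.append(b)
--     if len(cand60) == 0: return True
--     cand57 = []
--     for b in cand60:
--         if pth[1] in b[57]:
--             cand57.append(b)
--     if len(cand57) == 0: return True
--     cand54 = []
--     for b in cand57:
--         if pth[2] in b[54]:
--             cand54.append(b)
--     return len(cand54) == 0
-- ===== SOURCE B (Python) =====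
-- def verify_pth(lst, pth): # pth: (7,1,4)
--     return not any(pth[0] in b[60] and pth[1] in b[57] and pth[2] in b[54] for b in lst)
-- ===== Notes on version B (the rewrite author's own statement) =====
-- stated objective: simpler
-- what changed: Replaces the three staged filter passes with their intermediate candidate lists by a single any-pass that tests each element against all three memberships with short-circuit and, returning its negation.
-- outside the precondition, e.g. on verify_pth([{61: [1]}], (7, 1, 4)): A raises KeyError, B raises KeyError
import Mathlib
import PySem

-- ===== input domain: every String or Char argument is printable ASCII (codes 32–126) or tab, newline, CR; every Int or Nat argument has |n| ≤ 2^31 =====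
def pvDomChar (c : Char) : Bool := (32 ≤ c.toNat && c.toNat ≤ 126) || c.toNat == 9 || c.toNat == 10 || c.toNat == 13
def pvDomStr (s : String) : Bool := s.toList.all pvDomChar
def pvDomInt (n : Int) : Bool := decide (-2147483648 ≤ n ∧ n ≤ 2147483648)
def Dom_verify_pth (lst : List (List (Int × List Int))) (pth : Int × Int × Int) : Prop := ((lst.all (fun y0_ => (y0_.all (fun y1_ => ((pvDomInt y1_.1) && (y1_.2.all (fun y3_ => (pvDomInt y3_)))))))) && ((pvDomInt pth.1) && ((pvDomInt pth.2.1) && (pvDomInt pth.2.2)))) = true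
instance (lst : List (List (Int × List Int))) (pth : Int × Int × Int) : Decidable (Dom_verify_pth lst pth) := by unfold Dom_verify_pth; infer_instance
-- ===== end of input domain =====

-- B replaces A's three staged filter passes by one short-circuiting any-pass; objective: simpler.

-- shared dict-lookup helper: Python b[k] totalized to [] (Pre_ guarantees the key is present wherever it is read)
def pvLookup (b : List (Int × List Int)) (k : Int) : List Int :=
  PySem.Dict.getD (PySem.Dict.mk b) k []

-- ===== PORT A =====
def verify_pth (lst : List (List (Int × List Int))) (pth : Int × Int × Int) : Bool :=
  let cand60 := lst.foldl (fun acc b => if (pvLookup b 60).contains pth.1 then acc ++ [b] else acc) []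
  if cand60.length = 0 then true
  else
    let cand57 := cand60.foldl (fun acc b => if (pvLookup b 57).contains pth.2.1 then acc ++ [b] else acc) []
    if cand57.length = 0 then true
    else
      let cand54 := cand57.foldl (fun acc b => if (pvLookup b 54).contains pth.2.2 then acc ++ [b] else acc) []
      cand54.length = 0

-- ===== PORT B =====
def verify_pth_alt (lst : List (List (Int × List Int))) (pth : Int × Int × Int) : Bool :=
  ! lst.any (fun b =>
      (pvLookup b 60).contains pth.1 &&
      (pvLookup b 57).contains pth.2.1 &&
      (pvLookup b 54).contains pth.2.2)

-- ===== PRECONDITION & SPEC =====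
-- Pre_ excludes exactly the inputs on which Python A raises KeyError: an element missing key 60,
-- or a stage-survivor missing key 57 (resp. 54); B raises the identical KeyError there.
def Pre_verify_pth (lst : List (List (Int × List Int))) (pth : Int × Int × Int) : Prop :=
  ∀ b ∈ lst, PySem.Dict.contains (PySem.Dict.mk b) 60 = true ∧
    ((pvLookup b 60).contains pth.1 = true →
      PySem.Dict.contains (PySem.Dict.mk b) 57 = true ∧
        ((pvLookup b 57).contains pth.2.1 = true →
          PySem.Dict.contains (PySem.Dict.mk b) 54 = true))
instance (lst : List (List (Int × List Int))) (pth : Int × Int × Int) : Decidable (Pre_verify_pth lst pth) := by unfold Pre_verify_pth; infer_instance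

def pvWitness_verify_pth : (List (List (Int × List Int))) × (Int × Int × Int) :=
  ([[(60, [7]), (57, [1]), (54, [4])], [(60, [8]), (57, [1]), (54, [5])]], (7, 1, 4))

def Spec_verify_pth (lst : List (List (Int × List Int))) (pth : Int × Int × Int) (out : Bool) : Prop := out = verify_pth_alt lst pth
instance (lst : List (List (Int × List Int))) (pth : Int × Int × Int) (out : Bool) : Decidable (Spec_verify_pth lst pth out) := by unfold Spec_verify_pth; infer_instance

-- ===== CLAIM (what is proved, stated in full; the proofs are below) =====
def Claim_equal_verify_pth : Prop := ∀ (lst : List (List (Int × List Int))) (pth : Int × Int × Int), Dom_verify_pth lst pth → Pre_verify_pth lst pth → Spec_verify_pth lst pth (verify_pth lst pth)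

-- ===== LEMMAS AND PROOFS =====

-- the fused predicate tested by B
def pvHit (pth : Int × Int × Int) (b : List (Int × List Int)) : Bool :=
  (pvLookup b 60).contains pth.1 &&
  ((pvLookup b 57).contains pth.2.1 &&
   (pvLookup b 54).contains pth.2.2)

theorem pv_filter3 (lst : List (List (Int × List Int))) (pth : Int × Int × Int) :
    ((lst.filter (fun b => (pvLookup b 60).contains pth.1)).filter
        (fun b => (pvLookup b 57).contains pth.2.1)).filter
        (fun b => (pvLookup b 54).contains pth.2.2)
      = lst.filter (pvHit pth) := by
  simp only [List.filter_filter]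
  congr 1
  funext b
  unfold pvHit
  ac_rfl

theorem pv_eq (lst : List (List (Int × List Int))) (pth : Int × Int × Int) :
    verify_pth lst pth = verify_pth_alt lst pth := by
  unfold verify_pth verify_pth_alt
  simp only [List.length_eq_zero_iff, PySem.List.foldl_append_if_eq_filter, List.nil_append]
  have halt : (fun b =>
      (pvLookup b 60).contains pth.1 &&
      (pvLookup b 57).contains pth.2.1 &&
      (pvLookup b 54).contains pth.2.2) = pvHit pth := by
    funext b; unfold pvHit; rw [Bool.and_assoc]
  rw [halt]
  by_cases hA : lst.any (pvHit pth) = true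
  · rcases List.any_eq_true.mp hA with ⟨b, hb, hfb⟩
    have h1 : (pvLookup b 60).contains pth.1 = true := by
      unfold pvHit at hfb; exact (Bool.and_eq_true_iff.mp hfb).1
    have h2 : (pvLookup b 57).contains pth.2.1 = true := by
      unfold pvHit at hfb
      exact (Bool.and_eq_true_iff.mp (Bool.and_eq_true_iff.mp hfb).2).1
    have hb1 : b ∈ lst.filter (fun b => (pvLookup b 60).contains pth.1) :=
      List.mem_filter.mpr ⟨hb, h1⟩
    have hb2 : b ∈ (lst.filter (fun b => (pvLookup b 60).contains pth.1)).filter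
        (fun b => (pvLookup b 57).contains pth.2.1) := List.mem_filter.mpr ⟨hb1, h2⟩
    have hb3 : b ∈ lst.filter (pvHit pth) := List.mem_filter.mpr ⟨hb, hfb⟩
    rw [if_neg (List.ne_nil_of_mem hb1), if_neg (List.ne_nil_of_mem hb2), pv_filter3, hA]
    simp [List.ne_nil_of_mem hb3]
  · have hF : lst.filter (pvHit pth) = [] :=
      List.filter_eq_nil_iff.mpr (List.any_eq_false.mp (Bool.eq_false_iff.mpr hA))
    rw [Bool.eq_false_iff.mpr hA]
    split_ifs with g1 g2
    · rfl
    · rfl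
    · rw [pv_filter3, hF]; rfl

-- ===== VERDICT (by name: the statement is the Claim_ definition above) =====
theorem verify_pth_spec : Claim_equal_verify_pth := by
  intro lst pth _ _
  unfold Spec_verify_pth
  exact pv_eq lst pth
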